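-- pv_equiv track=rewrite | github.com/pypi-data/pypi-mirror-352 | packages/get-oblique/get_oblique-0.1.0.tar.gz/get_oblique-0.1.0/GET/warmStart.py | getNodesId
-- ===== SOURCE A (Python) =====
-- def getNodesId(ind, Hind):
--     ind -= 1                  # index starts from 0
--     branchNodes = [ind]
--     currentNodes = [ind]
--     for _ in range(Hind-1):
--         nextNodes = [2*node + j for node in currentNodes for j in [1, 2]]
--         branchNodes.extend(nextNodes)
--         currentNodes = nextNodes
--     leftLeaf = 2*(ind+1) if Hind == 1 else 2*(nextNodes[0]+1)      # read index start from 1. eg, 32 means the 32th node, the first leaf node and index should be 31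
--     return branchNodes, leftLeaf
-- ===== SOURCE B (Python) =====
-- def getNodesId(ind, Hind):
--     root = ind - 1
--     branchNodes = [n
--                    for k in range(Hind)
--                    for n in range((root + 1) * 2**k - 1, (root + 1) * 2**k - 1 + 2**k)]
--     return branchNodes, (root + 1) * 2**Hind
-- ===== Notes on version B (the rewrite author's own statement) =====
-- stated objective: alternative
-- what changed: B replaces the level-by-level child expansion (2*node+j over the previous level) with direct arithmetic: each level k of the subtree is the contiguous range starting at (ind)*2^k - 1, and the leftmost leaf is the closed form ind*2^Hind.
import Mathlib
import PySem

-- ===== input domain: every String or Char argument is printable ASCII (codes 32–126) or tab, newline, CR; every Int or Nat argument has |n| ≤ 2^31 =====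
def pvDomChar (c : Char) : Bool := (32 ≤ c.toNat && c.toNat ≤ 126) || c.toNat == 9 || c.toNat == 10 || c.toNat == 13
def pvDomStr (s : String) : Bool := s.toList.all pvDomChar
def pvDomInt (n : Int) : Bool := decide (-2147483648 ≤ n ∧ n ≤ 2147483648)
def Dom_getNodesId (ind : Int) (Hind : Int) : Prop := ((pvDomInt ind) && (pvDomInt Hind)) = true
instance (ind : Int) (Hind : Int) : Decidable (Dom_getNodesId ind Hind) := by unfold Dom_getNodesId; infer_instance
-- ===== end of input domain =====

-- B replaces A's level-by-level child expansion by direct per-level arithmetic ranges and a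
-- closed-form leftmost leaf (alternative decomposition, same cost).

-- ===== PORT A =====
-- Loop state is (branchNodes, currentNodes); after the loop has run at least once the Python
-- variable nextNodes equals currentNodes, so leftLeaf reads the state's second component
-- (headD 0 stands for nextNodes[0]; Pre_ guarantees the list is nonempty whenever Python reads it).
def getNodesId (ind : Int) (Hind : Int) : List Int × Int :=
  let ind := ind - 1
  let st := (List.range (Hind - 1).toNat).foldl
      (fun (st : List Int × List Int) _ =>
        let nextNodes := st.2.flatMap (fun node => [2*node+1, 2*node+2])
        (st.1 ++ nextNodes, nextNodes))
      ([ind], [ind])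
  let leftLeaf := if Hind == 1 then 2*(ind+1) else 2*(st.2.headD 0 + 1)
  (st.1, leftLeaf)

-- ===== PORT B =====
def getNodesId_alt (ind : Int) (Hind : Int) : List Int × Int :=
  let root := ind - 1
  let branchNodes := (List.range Hind.toNat).flatMap (fun k =>
    (List.range (2^k)).map (fun i => (root + 1) * 2^k - 1 + Int.ofNat i))
  (branchNodes, (root + 1) * 2^Hind.toNat)

-- ===== PRECONDITION & SPEC =====
-- A raises NameError for Hind ≤ 0 (nextNodes is never assigned); exactly those inputs are excluded.
def Pre_getNodesId (ind : Int) (Hind : Int) : Prop := 1 ≤ Hind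
instance (ind : Int) (Hind : Int) : Decidable (Pre_getNodesId ind Hind) := by unfold Pre_getNodesId; infer_instance
def pvWitness_getNodesId : Int × Int := (3, 2)
def Spec_getNodesId (ind : Int) (Hind : Int) (out : List Int × Int) : Prop := out = getNodesId_alt ind Hind
instance (ind : Int) (Hind : Int) (out : List Int × Int) : Decidable (Spec_getNodesId ind Hind out) := by unfold Spec_getNodesId; infer_instance

-- ===== CLAIM (what is proved, stated in full; the proofs are below) =====
def Claim_equal_getNodesId : Prop := ∀ (ind : Int) (Hind : Int), Dom_getNodesId ind Hind → Pre_getNodesId ind Hind → Spec_getNodesId ind Hind (getNodesId ind Hind)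

-- ===== LEMMAS AND PROOFS =====

/-- Level `k` of the subtree rooted at `root` (0-indexed heap), as B builds it. -/
def pvLevel (root : Int) (k : Nat) : List Int :=
  (List.range (2^k)).map (fun i => (root + 1) * 2^k - 1 + Int.ofNat i)

/-- Children of a contiguous block of nodes form the next contiguous block. -/
lemma pvChildren_range (s : Int) (L : Nat) :
    ((List.range L).map (fun i => s + Int.ofNat i)).flatMap (fun n => [2*n+1, 2*n+2])
      = (List.range (2*L)).map (fun i => (2*s+1) + Int.ofNat i) := by
  induction L with
  | zero => simp
  | succ L ih =>
      have h2 : 2*(L+1) = (2*L + 1) + 1 := by ring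
      rw [List.range_succ, h2, List.range_succ, List.range_succ, List.append_assoc]
      simp only [List.map_append, List.flatMap_append, ih, List.map_cons, List.map_nil,
        List.flatMap_cons, List.flatMap_nil, List.append_nil]
      congr 1
      simp only [List.singleton_append, List.cons.injEq, and_true]
      constructor <;> (simp only [Int.ofNat_eq_natCast]; push_cast; ring)

lemma pvChildren_level (root : Int) (k : Nat) :
    (pvLevel root k).flatMap (fun n => [2*n+1, 2*n+2]) = pvLevel root (k+1) := by
  unfold pvLevel
  rw [pvChildren_range ((root + 1) * 2^k - 1) (2^k)]
  have h2 : 2 * 2^k = 2^(k+1) := by rw [pow_succ]; ring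
  rw [h2]
  congr 1
  funext i
  ring_nf

lemma pvLevel_zero (root : Int) : pvLevel root 0 = [root] := by
  simp [pvLevel]

/-- Invariant for A's loop: after `m` iterations branchNodes is the concatenation of levels
`0..m` and currentNodes is level `m`. -/
lemma pvLoop_inv (root : Int) (m : Nat) :
    (List.range m).foldl
      (fun (st : List Int × List Int) _ =>
        let nextNodes := st.2.flatMap (fun node => [2*node+1, 2*node+2])
        (st.1 ++ nextNodes, nextNodes))
      ([root], [root])
      = ((List.range (m+1)).flatMap (pvLevel root), pvLevel root m) := by
  induction m with
  | zero => simp [pvLevel_zero]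
  | succ m ih =>
      rw [List.range_succ, List.foldl_append, ih]
      simp only [List.foldl_cons, List.foldl_nil]
      rw [pvChildren_level]
      rw [List.range_succ (n := m + 1), List.flatMap_append]
      simp

lemma pvLevel_headD (root : Int) (k : Nat) :
    (pvLevel root k).headD 0 = (root + 1) * 2^k - 1 := by
  unfold pvLevel
  have : 2^k = (2^k - 1) + 1 := (Nat.succ_pred_eq_of_pos (Nat.two_pow_pos k)).symm
  rw [this, List.range_succ_eq_map]
  simp

-- ===== VERDICT (by name: the statement is the Claim_ definition above) =====
theorem getNodesId_spec : Claim_equal_getNodesId := by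
  intro ind Hind _ hpre
  unfold Spec_getNodesId getNodesId getNodesId_alt
  dsimp only
  have hpre' : (1 : Int) ≤ Hind := hpre
  have hm : Hind.toNat = (Hind - 1).toNat + 1 := by omega
  set root := ind - 1 with hroot
  set m := (Hind - 1).toNat with hmdef
  rw [pvLoop_inv root m]
  simp only [hm]
  refine Prod.ext rfl ?_
  simp only
  by_cases h1 : Hind = 1
  · have : m = 0 := by omega
    subst h1
    simp [this]
    ring
  · have hne : (Hind == 1) = false := by
      simp [h1]
    rw [hne]
    simp only [Bool.false_eq_true, if_false, pvLevel_headD]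
    rw [pow_succ]
    ring
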